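-- pv_equiv track=rewrite | github.com/tomasvanagas/prime-research | experiments/wildcard/finite_field_lift.py | count_eisenstein_primes
-- ===== SOURCE A (Python) =====
-- import math
--
-- def sieve_primes(limit):
--     """Sieve of Eratosthenes up to limit."""
--     if limit < 2:
--         return []
--     is_prime = [True] * (limit + 1)
--     is_prime[0] = is_prime[1] = False
--     for i in range(2, int(math.isqrt(limit)) + 1):
--         if is_prime[i]:
--             for j in range(i * i, limit + 1, i):
--                 is_prime[j] = False
--     return [i for i in range(2, limit + 1) if is_prime[i]]
--
-- def count_eisenstein_primes(N):
--     """
--     Count Eisenstein primes (Z[omega]) with norm <= N.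
--     - omega = (-1+sqrt(-3))/2
--     - Norm: a^2 - ab + b^2
--     - Primes:
--       - 1 - omega (norm 3): ramified
--       - pi, pi_bar where N(pi) = p, p = 1 mod 3 (splits)
--       - p where p = 2 mod 3 (inert, norm p^2)
--     """
--     count = 0
--     if N >= 3:
--         count += 1  # norm 3 prime
--
--     primes = sieve_primes(N)
--     for p in primes:
--         if p == 3:
--             continue
--         if p % 3 == 1:
--             count += 2  # splits
--         elif p % 3 == 2:
--             if p * p <= N:
--                 count += 1  # inert
--
--     return count
-- ===== SOURCE B (Python) =====
-- import math
--
-- def count_eisenstein_primes(N):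
--     # One pass with direct trial-division primality: no sieve array, no prime list.
--     def is_prime(n):
--         if n < 4:
--             return True  # only ever called with n >= 2
--         if n % 2 == 0:
--             return False
--         return all(n % d != 0 for d in range(3, math.isqrt(n) + 1, 2))
--
--     total = 1 if N >= 3 else 0
--     for p in range(2, N + 1):
--         if is_prime(p):
--             if p % 3 == 1:
--                 total += 2
--             elif p % 3 == 2 and p * p <= N:
--                 total += 1
--     return total
-- ===== Notes on version B (the rewrite author's own statement) =====
-- stated objective: alternative
-- what changed: Replaces the Eratosthenes sieve (mutable boolean array + materialized prime list, then a second pass over the primes) by a single pass over 2..N with direct trial-division primality testing and the two residue-class branches folded into one conditional chain.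
import Mathlib
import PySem

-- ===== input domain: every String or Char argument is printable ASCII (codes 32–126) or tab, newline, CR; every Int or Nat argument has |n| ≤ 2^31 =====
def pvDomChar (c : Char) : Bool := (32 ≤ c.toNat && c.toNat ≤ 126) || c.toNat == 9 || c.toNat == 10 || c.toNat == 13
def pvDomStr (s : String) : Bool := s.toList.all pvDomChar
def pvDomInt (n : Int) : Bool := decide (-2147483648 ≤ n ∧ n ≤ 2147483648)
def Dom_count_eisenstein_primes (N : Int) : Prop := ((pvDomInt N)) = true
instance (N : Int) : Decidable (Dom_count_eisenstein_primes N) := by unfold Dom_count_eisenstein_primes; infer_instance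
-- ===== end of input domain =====

-- B replaces A's Eratosthenes sieve + second pass over the prime list by a single pass over
-- 2..N with direct trial-division primality testing (objective: alternative, not faster).

-- ===== PORT A =====
-- helpers for the sieve: the boolean array `is_prime` (indices are provably nonnegative and
-- in range on every path, so `.toNat` and the `.getD false` default are exact)
def pvArrInit (limit : Int) : Array Bool :=
  ((Array.replicate (limit.toNat + 1) true).set! 0 false).set! 1 false

-- inner loop `for j in range(i*i, limit+1, i): is_prime[j] = False`
def pvSieveInner (limit i : Int) (a : Array Bool) : Array Bool :=
  (PySem.List.pyRange (i * i) (limit + 1) i).foldl (fun a' j => a'.set! j.toNat false) a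

-- outer loop body `if is_prime[i]: …`
def pvSieveStep (limit : Int) (a : Array Bool) (i : Int) : Array Bool :=
  if a[i.toNat]?.getD false then pvSieveInner limit i a else a

def sieve_primes (limit : Int) : List Int :=
  if limit < 2 then []
  else
    let arr := (PySem.List.pyRange 2 ((Nat.sqrt limit.toNat : Int) + 1) 1).foldl
      (pvSieveStep limit) (pvArrInit limit)
    (PySem.List.pyRange 2 (limit + 1) 1).filter (fun i => arr[i.toNat]?.getD false)

-- loop body of A's second pass (the `continue` for p == 3 and the if/elif chain)
def pvEisStep (N c p : Int) : Int :=
  if p = 3 then c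
  else if PySem.Int.mod p 3 = 1 then c + 2
  else if PySem.Int.mod p 3 = 2 then (if p * p ≤ N then c + 1 else c)
  else c

def count_eisenstein_primes (N : Int) : Int :=
  (sieve_primes N).foldl (pvEisStep N) (if 3 ≤ N then 1 else 0)

-- ===== PORT B =====
-- B's `is_prime`: constant tests for small/even n, then odd-step trial division
def pvIsPrime (n : Int) : Bool :=
  if n < 4 then true
  else if PySem.Int.mod n 2 = 0 then false
  else (PySem.List.pyRange 3 ((Nat.sqrt n.toNat : Int) + 1) 2).all (fun d => !(PySem.Int.mod n d == 0))

-- body of B's single loop after the primality guard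
def pvEisStepAlt (N t p : Int) : Int :=
  if PySem.Int.mod p 3 = 1 then t + 2
  else if PySem.Int.mod p 3 = 2 ∧ p * p ≤ N then t + 1
  else t

def count_eisenstein_primes_alt (N : Int) : Int :=
  (PySem.List.pyRange 2 (N + 1) 1).foldl
    (fun t p => if pvIsPrime p then pvEisStepAlt N t p else t)
    (if 3 ≤ N then 1 else 0)

-- ===== PRECONDITION & SPEC =====
def Spec_count_eisenstein_primes (N : Int) (out : Int) : Prop := out = count_eisenstein_primes_alt N
instance (N : Int) (out : Int) : Decidable (Spec_count_eisenstein_primes N out) := by unfold Spec_count_eisenstein_primes; infer_instance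

-- ===== CLAIM (what is proved, stated in full; the proofs are below) =====
def Claim_equal_count_eisenstein_primes : Prop := ∀ (N : Int), Dom_count_eisenstein_primes N → Spec_count_eisenstein_primes N (count_eisenstein_primes N)

-- ===== LEMMAS AND PROOFS =====

-- Python's % (fmod) on nonnegative operands is Nat.%
lemma pvFmod_cast (a b : Nat) : (a : Int).fmod b = ((a % b : Nat) : Int) := by
  rw [Int.fmod_eq_emod]; push_cast; simp

lemma pvFmod_zero_iff_dvd (a b : Nat) : ((a : Int).fmod b = 0) ↔ b ∣ a := by
  rw [pvFmod_cast]; norm_cast; exact (Nat.dvd_iff_mod_eq_zero).symm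

-- "n survives the sieve after all primes < k have been processed"
abbrev pvSurv (k n : Nat) : Prop :=
  2 ≤ n ∧ ∀ p < k, Nat.Prime p → ¬(p ∣ n ∧ p * p ≤ n)

lemma pvSurv_two (n : Nat) : pvSurv 2 n ↔ 2 ≤ n := by
  constructor
  · exact fun h => h.1
  · refine fun h => ⟨h, fun p hp hpp => ?_⟩
    interval_cases p
    · exact absurd hpp Nat.not_prime_zero
    · exact absurd hpp Nat.not_prime_one

lemma pvSurv_self (k : Nat) (hk : 2 ≤ k) : pvSurv k k ↔ Nat.Prime k := by
  constructor
  · intro ⟨_, h⟩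
    by_contra hnp
    have hq := Nat.minFac_prime (by omega : k ≠ 1)
    have hqq : k.minFac * k.minFac ≤ k := by
      have := Nat.minFac_sq_le_self (by omega : 0 < k) hnp
      simpa [pow_two] using this
    have hqk : k.minFac < k := by
      have h2 := hq.two_le
      nlinarith
    exact h k.minFac hqk hq ⟨Nat.minFac_dvd k, hqq⟩
  · intro hp
    refine ⟨hk, fun p hpk hpp ⟨hdvd, hsq⟩ => ?_⟩
    rcases (Nat.Prime.eq_one_or_self_of_dvd hp p hdvd) with h | h
    · exact absurd h (Nat.Prime.ne_one hpp)
    · omega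

lemma pvSurv_succ_prime (k n : Nat) (hk : Nat.Prime k) :
    pvSurv (k + 1) n ↔ pvSurv k n ∧ ¬(k ∣ n ∧ k * k ≤ n) := by
  constructor
  · intro ⟨h2, h⟩
    exact ⟨⟨h2, fun p hp hpp => h p (by omega) hpp⟩, h k (by omega) hk⟩
  · intro ⟨⟨h2, h⟩, hkn⟩
    refine ⟨h2, fun p hp hpp => ?_⟩
    rcases Nat.lt_succ_iff_lt_or_eq.mp hp with h' | h'
    · exact h p h' hpp
    · subst h'; exact hkn

lemma pvSurv_succ_not_prime (k n : Nat) (hk : ¬Nat.Prime k) :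
    pvSurv (k + 1) n ↔ pvSurv k n := by
  constructor
  · intro ⟨h2, h⟩
    exact ⟨h2, fun p hp hpp => h p (by omega) hpp⟩
  · intro ⟨h2, h⟩
    refine ⟨h2, fun p hp hpp => ?_⟩
    rcases Nat.lt_succ_iff_lt_or_eq.mp hp with h' | h'
    · exact h p h' hpp
    · subst h'; exact absurd hpp hk

lemma pvSurv_final (L n : Nat) (hn : n ≤ L) :
    pvSurv (Nat.sqrt L + 1) n ↔ Nat.Prime n := by
  constructor
  · intro ⟨h2, h⟩
    by_contra hnp
    have hq := Nat.minFac_prime (by omega : n ≠ 1)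
    have hqq : n.minFac * n.minFac ≤ n := by
      have := Nat.minFac_sq_le_self (by omega : 0 < n) hnp
      simpa [pow_two] using this
    have hle : n.minFac ≤ Nat.sqrt L :=
      le_trans (Nat.le_sqrt.mpr hqq) (Nat.sqrt_le_sqrt hn)
    exact h n.minFac (by omega) hq ⟨Nat.minFac_dvd n, hqq⟩
  · intro hp
    refine ⟨hp.two_le, fun p _ hpp ⟨hdvd, hsq⟩ => ?_⟩
    rcases (Nat.Prime.eq_one_or_self_of_dvd hp p hdvd) with h | h
    · exact absurd h (Nat.Prime.ne_one hpp)
    · subst h; have := hp.two_le; nlinarith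

-- the inner marking fold, characterised pointwise
lemma pvFoldSet_size (l : List Int) (a : Array Bool) :
    (l.foldl (fun a' j => a'.set! j.toNat false) a).size = a.size := by
  induction l generalizing a with
  | nil => rfl
  | cons j tl ih =>
    simp only [List.foldl_cons]
    rw [ih]
    simp [Array.set!]

lemma pvFoldSet_get? (l : List Int) (hl : ∀ j ∈ l, 0 ≤ j) (a : Array Bool) (n : Nat) :
    (l.foldl (fun a' j => a'.set! j.toNat false) a)[n]? =
      if (n : Int) ∈ l then (if n < a.size then some false else none) else a[n]? := by
  induction l generalizing a with
  | nil => simp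
  | cons j tl ih =>
    have hj : 0 ≤ j := hl j (List.mem_cons_self)
    have htl : ∀ x ∈ tl, 0 ≤ x := fun x hx => hl x (List.mem_cons_of_mem _ hx)
    simp only [List.foldl_cons]
    rw [ih htl]
    have hsz : (a.set! j.toNat false).size = a.size := by simp [Array.set!]
    have hget : (a.set! j.toNat false)[n]? =
        if j.toNat = n then (if n < a.size then some false else none) else a[n]? := by
      simp only [Array.set!, Array.getElem?_setIfInBounds]
      split
      · next h => subst h; rfl
      · rfl
    have hjn : (j.toNat = n) ↔ ((n : Int) = j) := by omega
    rw [hsz, hget]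
    by_cases h1 : (n : Int) ∈ tl
    · simp [h1, List.mem_cons]
    · by_cases h2 : (n : Int) = j
      · have : j.toNat = n := by omega
        simp only [this, if_pos, List.mem_cons, h2]
        simp
      · have : ¬(j.toNat = n) := by omega
        simp only [this, List.mem_cons, h1, or_false]
        simp [h2]

lemma pvMem_inner (limit i x : Int) (hi : 0 < i) :
    x ∈ PySem.List.pyRange (i * i) (limit + 1) i ↔ i * i ≤ x ∧ x < limit + 1 ∧ i ∣ x := by
  rw [PySem.List.mem_pyRange_iff_of_pos hi]
  have h : i ∣ i * i := dvd_mul_right i i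
  constructor
  · rintro ⟨h1, h2, h3⟩
    exact ⟨h1, h2, by have := dvd_add h3 h; simpa using this⟩
  · rintro ⟨h1, h2, h3⟩
    exact ⟨h1, h2, dvd_sub h3 h⟩

lemma pvArrInit_get? (limit : Int) (n : Nat) :
    (pvArrInit limit)[n]? = if n ≤ limit.toNat then some (decide (2 ≤ n)) else none := by
  unfold pvArrInit
  simp only [Array.set!, Array.getElem?_setIfInBounds, Array.size_setIfInBounds,
    Array.getElem?_replicate, Array.size_replicate]
  have h0 : (0 : Nat) ≤ limit.toNat := by omega
  split_ifs <;> simp_all <;> omega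

lemma pvOuter_size (limit : Int) (l : List Int) (a : Array Bool) :
    (l.foldl (pvSieveStep limit) a).size = a.size := by
  induction l generalizing a with
  | nil => rfl
  | cons i tl ih =>
    simp only [List.foldl_cons, ih]
    unfold pvSieveStep
    split
    · exact pvFoldSet_size _ _
    · rfl

-- the outer sieve loop invariant
lemma pvOuter_inv (limit : Int) (hlim : 2 ≤ limit) (m : Nat)
    (hm : 2 + m ≤ Nat.sqrt limit.toNat + 1) (n : Nat) :
    ((PySem.List.pyRange 2 (2 + (m : Int)) 1).foldl (pvSieveStep limit) (pvArrInit limit))[n]? =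
      if n ≤ limit.toNat then some (decide (pvSurv (2 + m) n)) else none := by
  induction m generalizing n with
  | zero =>
    have h2 : ((2 : Int) + (0 : Nat)) = 2 := by norm_num
    rw [h2, PySem.List.pyRange_one_eq_nil le_rfl, List.foldl_nil, pvArrInit_get?]
    split
    · simp [pvSurv_two]
    · rfl
  | succ m ih =>
    have ihm : 2 + m ≤ Nat.sqrt limit.toNat + 1 := by omega
    have hcast : ((2 : Int) + ((m + 1 : Nat) : Int)) = (2 + (m : Int)) + 1 := by push_cast; ring
    rw [hcast, PySem.List.pyRange_one_succ_right (by omega : (2:Int) ≤ 2 + (m : Int)),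
      List.foldl_append, List.foldl_cons, List.foldl_nil]
    set a := (PySem.List.pyRange 2 (2 + (m : Int)) 1).foldl (pvSieveStep limit) (pvArrInit limit) with ha
    have hasize : a.size = limit.toNat + 1 := by
      rw [ha, pvOuter_size]
      simp [pvArrInit, Array.set!]
    set k : Nat := 2 + m with hk
    have hik : (2 : Int) + (m : Int) = (k : Int) := by omega
    have hkL : k ≤ limit.toNat := by
      have h1 : k ≤ Nat.sqrt limit.toNat := by omega
      have h2 := Nat.sqrt_le_self limit.toNat
      omega
    have hitoNat : ((2 : Int) + (m : Int)).toNat = k := by omega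
    have hself : a[k]? = some (decide (pvSurv k k)) := by rw [ih ihm k, if_pos hkL]
    unfold pvSieveStep
    rw [hitoNat, hself]
    have hmemc : ∀ x : Nat, ((x : Int) ∈ PySem.List.pyRange ((2 + (m:Int)) * (2 + (m:Int))) (limit + 1) (2 + (m:Int))) ↔
        (k * k ≤ x ∧ x ≤ limit.toNat ∧ k ∣ x) := by
      intro x
      rw [pvMem_inner _ _ _ (by omega : (0:Int) < 2 + (m:Int)), hik]
      constructor
      · rintro ⟨h1, h2, h3⟩
        exact ⟨by exact_mod_cast h1, by omega, by exact_mod_cast h3⟩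
      · rintro ⟨h1, h2, h3⟩
        exact ⟨by exact_mod_cast h1, by omega, by exact_mod_cast h3⟩
    by_cases hkp : Nat.Prime k
    · have hsurvk : pvSurv k k := (pvSurv_self k (by omega)).mpr hkp
      rw [Option.getD_some, if_pos (decide_eq_true hsurvk)]
      unfold pvSieveInner
      rw [pvFoldSet_get? _ (fun j hj => by
        have := (pvMem_inner limit (2 + (m:Int)) j (by omega : (0:Int) < 2 + (m:Int))).mp hj
        nlinarith [this.1]) a n]
      rw [hasize]
      by_cases hn : n ≤ limit.toNat
      · by_cases hmark : k * k ≤ n ∧ k ∣ n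
        · rw [if_pos ((hmemc n).mpr ⟨hmark.1, hn, hmark.2⟩), if_pos (by omega), if_pos hn]
          have : ¬ pvSurv (k + 1) n := by
            rw [pvSurv_succ_prime k n hkp]
            rintro ⟨-, hcon⟩
            exact hcon ⟨hmark.2, hmark.1⟩
          have hgoal : (2 + (m + 1)) = k + 1 := by omega
          rw [hgoal]
          simp [this]
        · rw [if_neg (fun hc => hmark ⟨((hmemc n).mp hc).1, ((hmemc n).mp hc).2.2⟩), ih ihm n, if_pos hn, if_pos hn]
          have hgoal : (2 + (m + 1)) = k + 1 := by omega
          rw [hgoal]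
          have : pvSurv (k + 1) n ↔ pvSurv k n := by
            rw [pvSurv_succ_prime k n hkp]
            constructor
            · exact fun h => h.1
            · intro h
              refine ⟨h, fun ⟨hd, hs⟩ => hmark ⟨hs, hd⟩⟩
          exact congrArg some (decide_eq_decide.mpr this.symm)
      · rw [if_neg (fun hc => hn ((hmemc n).mp hc).2.1), ih ihm n, if_neg hn, if_neg hn]
    · have : ¬ pvSurv k k := fun hc => hkp ((pvSurv_self k (by omega)).mp hc)
      rw [Option.getD_some, if_neg (by simp [this]), ih ihm n]
      have hgoal : (2 + (m + 1)) = k + 1 := by omega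
      rw [hgoal]
      split
      · simp [pvSurv_succ_not_prime k n hkp]
      · rfl

lemma pvSieve_eq (limit : Int) :
    sieve_primes limit =
      (PySem.List.pyRange 2 (limit + 1) 1).filter (fun i => decide (Nat.Prime i.toNat)) := by
  by_cases h : limit < 2
  · rw [sieve_primes, if_pos h, PySem.List.pyRange_one_eq_nil (by omega : limit + 1 ≤ 2)]
    rfl
  · simp only [sieve_primes, if_neg h]
    refine List.filter_congr ?_
    intro i hi
    rw [PySem.List.mem_pyRange_one] at hi
    have hsq : 1 ≤ Nat.sqrt limit.toNat := Nat.le_sqrt.mpr (by omega)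
    set m : Nat := Nat.sqrt limit.toNat - 1 with hmdef
    have hcast : ((Nat.sqrt limit.toNat : Nat) : Int) + 1 = 2 + (m : Int) := by omega
    have hm : 2 + m ≤ Nat.sqrt limit.toNat + 1 := by omega
    rw [hcast, pvOuter_inv limit (by omega) m hm i.toNat,
      if_pos (by omega : i.toNat ≤ limit.toNat), Option.getD_some]
    have h2m : 2 + m = Nat.sqrt limit.toNat + 1 := by omega
    rw [h2m]
    exact decide_eq_decide.mpr (pvSurv_final limit.toNat i.toNat (by omega))

lemma pvIsPrime_eq (p : Int) (hp : 2 ≤ p) : pvIsPrime p = decide (Nat.Prime p.toNat) := by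
  have hcast : ((p.toNat : Nat) : Int) = p := by omega
  unfold pvIsPrime
  by_cases h4 : p < 4
  · rw [if_pos h4]
    have h23 : p.toNat = 2 ∨ p.toNat = 3 := by omega
    rcases h23 with h | h <;> rw [h] <;> simp [Nat.prime_two, Nat.prime_three]
  · rw [if_neg h4]
    have hfmod2 : (PySem.Int.mod p 2 = 0) ↔ 2 ∣ p.toNat := by
      rw [show PySem.Int.mod p 2 = ((p.toNat : Nat) : Int).fmod ((2 : Nat) : Int) by rw [hcast]; rfl,
        pvFmod_zero_iff_dvd]
    by_cases he : PySem.Int.mod p 2 = 0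
    · rw [if_pos he]
      have h2 : 2 ∣ p.toNat := hfmod2.mp he
      have hnp : ¬ Nat.Prime p.toNat := by
        intro hpr
        rcases hpr.eq_one_or_self_of_dvd 2 h2 with h | h <;> omega
      simp [hnp]
    · rw [if_neg he]
      have hodd : ¬ 2 ∣ p.toNat := fun hc => he (hfmod2.mpr hc)
      rw [Bool.eq_iff_iff, decide_eq_true_iff, List.all_eq_true, Nat.prime_def_le_sqrt]
      constructor
      · intro h
        refine ⟨by omega, fun d hd2 hds hdvd => ?_⟩
        have hdodd : ¬ 2 ∣ d := fun hc => hodd (dvd_trans hc hdvd)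
        have hd3 : 3 ≤ d := by omega
        have hmem : ((d : Nat) : Int) ∈ PySem.List.pyRange 3 ((Nat.sqrt p.toNat : Int) + 1) 2 := by
          rw [PySem.List.mem_pyRange_iff_of_pos (by norm_num)]
          refine ⟨by exact_mod_cast hd3, ?_, by omega⟩
          exact_mod_cast Nat.lt_succ_of_le hds
        have hthis := h _ hmem
        simp only [Bool.not_eq_eq_eq_not, Bool.not_true, beq_eq_false_iff_ne, ne_eq] at hthis
        apply hthis
        show PySem.Int.mod p (d : Int) = 0
        calc PySem.Int.mod p (d : Int) = ((p.toNat : Nat) : Int).fmod (d : Int) := by rw [hcast]; rfl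
          _ = ((p.toNat % d : Nat) : Int) := pvFmod_cast _ _
          _ = 0 := by norm_cast; omega
      · intro ⟨_, h⟩ d hd
        rw [PySem.List.mem_pyRange_iff_of_pos (by norm_num)] at hd
        obtain ⟨hd3, hdlt, hdo⟩ := hd
        have hd0 : ((d.toNat : Nat) : Int) = d := by omega
        have hnd : ¬ d.toNat ∣ p.toNat := h d.toNat (by omega) (by omega)
        simp only [Bool.not_eq_eq_eq_not, Bool.not_true, beq_eq_false_iff_ne, ne_eq]
        intro hc
        apply hnd
        have hz : ((p.toNat : Nat) : Int).fmod ((d.toNat : Nat) : Int) = 0 := by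
          rw [hcast, hd0]; exact hc
        exact (pvFmod_zero_iff_dvd _ _).mp hz

lemma pvStep_eq (N c p : Int) : pvEisStep N c p = pvEisStepAlt N c p := by
  by_cases h3 : p = 3
  · subst h3
    simp [pvEisStep, pvEisStepAlt]
  · unfold pvEisStep pvEisStepAlt
    rw [if_neg h3]
    by_cases h1 : PySem.Int.mod p 3 = 1
    · rw [if_pos h1, if_pos h1]
    · rw [if_neg h1, if_neg h1]
      by_cases h2 : PySem.Int.mod p 3 = 2
      · rw [if_pos h2]
        by_cases hN : p * p ≤ N
        · rw [if_pos hN, if_pos ⟨h2, hN⟩]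
        · rw [if_neg hN, if_neg (fun hc => hN hc.2)]
      · rw [if_neg h2, if_neg (fun hc => h2 hc.1)]

-- ===== VERDICT (by name: the statement is the Claim_ definition above) =====
theorem count_eisenstein_primes_spec : Claim_equal_count_eisenstein_primes := by
  intro N _
  unfold Spec_count_eisenstein_primes
  unfold count_eisenstein_primes count_eisenstein_primes_alt
  rw [pvSieve_eq, List.foldl_filter]
  apply PySem.List.foldl_congr_mem
  intro c p hp
  rw [PySem.List.mem_pyRange_one] at hp
  rw [pvIsPrime_eq p (by omega), pvStep_eq]
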